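-- pv_equiv track=rewrite | github.com/applabsa/Targets-CalstarNetwork | streamlit_app.py | get_future_months
-- ===== SOURCE A (Python) =====
-- def get_future_months(selected_month, selected_year, months_ahead=6):
--     month_order = ["Jan", "Feb", "Mar", "Apr", "May", "Jun",
--                    "Jul", "Aug", "Sep", "Oct", "Nov", "Dec"]
--     current_month_index = month_order.index(selected_month)
--     future_months = []
--     for i in range(1, months_ahead+1):
--         index = (current_month_index + i) % 12
--         month = month_order[index]
--         year = selected_year + (current_month_index + i) // 12
--         future_months.append((month, year))
--     return future_months
-- ===== SOURCE B (Python) =====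
-- def get_future_months(selected_month, selected_year, months_ahead=6):
--     month_order = ["Jan", "Feb", "Mar", "Apr", "May", "Jun",
--                    "Jul", "Aug", "Sep", "Oct", "Nov", "Dec"]
--     ci = month_order.index(selected_month)
--     # rotate the calendar so it starts at the month after the selected one,
--     # tagging each slot with the year it falls in; then tile whole-year
--     # blocks (bumping the year per block) and truncate to months_ahead.
--     rotated = month_order[ci + 1:] + month_order[:ci + 1]
--     base = [(m, selected_year + (0 if ci + 1 + p < 12 else 1))
--             for p, m in enumerate(rotated)]
--     cycles = (months_ahead + 11) // 12
--     result = []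
--     for c in range(cycles):
--         result.extend((m, y + c) for m, y in base)
--     return result[:months_ahead]
-- ===== Notes on version B (the rewrite author's own statement) =====
-- stated objective: alternative
-- what changed: B rotates the month list once into a next-month-first year block tagged with per-slot year offsets, then tiles whole-year copies of that block (bumping the year per copy) and truncates to months_ahead, instead of computing every entry individually from the base index with %12 and //12.
import Mathlib
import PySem

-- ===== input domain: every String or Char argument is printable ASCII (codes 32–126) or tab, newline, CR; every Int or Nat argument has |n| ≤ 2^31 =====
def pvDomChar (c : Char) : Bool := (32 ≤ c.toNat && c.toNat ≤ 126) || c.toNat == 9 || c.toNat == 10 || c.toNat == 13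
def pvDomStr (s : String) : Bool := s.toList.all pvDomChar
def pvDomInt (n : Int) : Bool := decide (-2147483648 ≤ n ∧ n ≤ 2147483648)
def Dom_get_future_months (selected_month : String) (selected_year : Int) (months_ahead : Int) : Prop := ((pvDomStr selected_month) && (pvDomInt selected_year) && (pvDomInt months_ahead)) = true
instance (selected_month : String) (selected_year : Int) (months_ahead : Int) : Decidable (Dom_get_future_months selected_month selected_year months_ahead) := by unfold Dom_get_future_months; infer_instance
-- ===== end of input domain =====

-- B rotates the month list once into a next-month-first year block tagged with per-slot
-- year offsets, then tiles whole-year copies of that block (bumping the year per copy)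
-- and truncates to months_ahead, instead of per-entry %12 / //12 index arithmetic.

-- ===== PORT A =====
def monthOrder : List String :=
  ["Jan", "Feb", "Mar", "Apr", "May", "Jun",
   "Jul", "Aug", "Sep", "Oct", "Nov", "Dec"]

-- literal port of A: for i in range(1, months_ahead+1): index = (ci+i)%12; append
def get_future_months (selected_month : String) (selected_year : Int) (months_ahead : Int) : List (String × Int) :=
  match PySem.List.index? monthOrder selected_month with
  | none => []   -- Python raises ValueError here; excluded by Pre_
  | some current_month_index =>
    (PySem.List.pyRange 1 (months_ahead + 1) 1).foldl
      (fun future_months i =>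
        let index := PySem.Int.mod ((current_month_index : Int) + i) 12
        let month := (PySem.List.pyGet? monthOrder index).getD ""   -- index is always in range
        let year := selected_year + PySem.Int.floordiv ((current_month_index : Int) + i) 12
        future_months ++ [(month, year)]) []

-- ===== PORT B =====
-- literal port of B: rotated = month_order[ci+1:] + month_order[:ci+1];
-- base = [(m, year + (0 if ci+1+p < 12 else 1)) for p, m in enumerate(rotated)];
-- cycles = (months_ahead+11)//12; extend a block per cycle; truncate with [:months_ahead]
def get_future_months_alt (selected_month : String) (selected_year : Int) (months_ahead : Int) : List (String × Int) :=
  match PySem.List.index? monthOrder selected_month with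
  | none => []   -- Python raises ValueError here; excluded by Pre_
  | some ci =>
    let rotated := PySem.List.slice monthOrder (some ((ci : Int) + 1)) none
                   ++ PySem.List.slice monthOrder none (some ((ci : Int) + 1))
    let base := (PySem.List.enumerate rotated 0).map
      (fun pm => (pm.2, selected_year + (if (ci : Int) + 1 + pm.1 < 12 then 0 else 1)))
    let cycles := PySem.Int.floordiv (months_ahead + 11) 12
    let result := (PySem.List.pyRange 0 cycles 1).foldl
      (fun acc c => acc ++ base.map (fun my => (my.1, my.2 + c))) []
    PySem.List.slice result none (some months_ahead)

-- ===== PRECONDITION & SPEC =====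
-- Pre_ excludes exactly the inputs where month_order.index raises ValueError (in both A and B).
def Pre_get_future_months (selected_month : String) (selected_year : Int) (months_ahead : Int) : Prop :=
  selected_month ∈ monthOrder
instance (selected_month : String) (selected_year : Int) (months_ahead : Int) : Decidable (Pre_get_future_months selected_month selected_year months_ahead) := by unfold Pre_get_future_months; infer_instance

def pvWitness_get_future_months : String × Int × Int := ("Nov", 2024, 6)

def Spec_get_future_months (selected_month : String) (selected_year : Int) (months_ahead : Int) (out : List (String × Int)) : Prop := out = get_future_months_alt selected_month selected_year months_ahead
instance (selected_month : String) (selected_year : Int) (months_ahead : Int) (out : List (String × Int)) : Decidable (Spec_get_future_months selected_month selected_year months_ahead out) := by unfold Spec_get_future_months; infer_instance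

-- ===== CLAIM (what is proved, stated in full; the proofs are below) =====
def Claim_equal_get_future_months : Prop := ∀ (selected_month : String) (selected_year : Int) (months_ahead : Int), Dom_get_future_months selected_month selected_year months_ahead → Pre_get_future_months selected_month selected_year months_ahead → Spec_get_future_months selected_month selected_year months_ahead (get_future_months selected_month selected_year months_ahead)

-- ===== LEMMAS AND PROOFS =====

-- the common closed form both programs produce, for a base index ci < 12
def gfmSpec (ci : Nat) (s : Int) (n : Nat) : List (String × Int) :=
  (List.range n).map (fun k =>
    ((monthOrder[(ci + 1 + k) % 12]?).getD "", s + (((ci + 1 + k) / 12 : Nat) : Int)))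

lemma gfmA_eq (ci : Nat) (s ma : Int) :
    (PySem.List.pyRange 1 (ma + 1) 1).foldl
      (fun acc i =>
        let index := PySem.Int.mod ((ci : Int) + i) 12
        let month := (PySem.List.pyGet? monthOrder index).getD ""
        let year := s + PySem.Int.floordiv ((ci : Int) + i) 12
        acc ++ [(month, year)]) [] = gfmSpec ci s ma.toNat := by
  rw [PySem.List.pyRange_one, PySem.List.foldl_append_singleton_eq_map, List.map_map]
  have hlen : (ma + 1 - 1).toNat = ma.toNat := by omega
  rw [hlen]
  unfold gfmSpec
  refine (List.nil_append _).trans (List.map_congr_left (fun k _ => ?_))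
  have hc : (ci : Int) + (1 + (k : Int)) = ((ci + 1 + k : Nat) : Int) := by push_cast; ring
  have hm : PySem.Int.mod ((ci + 1 + k : Nat) : Int) 12 = (((ci + 1 + k) % 12 : Nat) : Int) := by
    exact_mod_cast PySem.Int.mod_natCast (ci + 1 + k) 12
  have hd : PySem.Int.floordiv ((ci + 1 + k : Nat) : Int) 12 = (((ci + 1 + k) / 12 : Nat) : Int) := by
    exact_mod_cast PySem.Int.floordiv_natCast (ci + 1 + k) 12
  simp only [Function.comp_apply, hc, hm, hd, PySem.List.pyGet?_natCast]

-- B's rotated-and-tagged year block, in closed form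
lemma gfmBase_eq (ci : Nat) (s : Int) (hci : ci < 12) :
    (PySem.List.enumerate (PySem.List.slice monthOrder (some ((ci : Int) + 1)) none
        ++ PySem.List.slice monthOrder none (some ((ci : Int) + 1))) 0).map
      (fun pm => (pm.2, s + (if (ci : Int) + 1 + pm.1 < 12 then 0 else 1)))
    = (List.range 12).map (fun p =>
        ((monthOrder[(ci + 1 + p) % 12]?).getD "", s + (((ci + 1 + p) / 12 : Nat) : Int))) := by
  have hc : (ci : Int) + 1 = ((ci + 1 : Nat) : Int) := by push_cast; ring
  rw [hc, PySem.List.slice_from_natCast, PySem.List.slice_to_natCast]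
  have hlen : monthOrder.length = 12 := by decide
  have hrot : monthOrder.drop (ci + 1) ++ monthOrder.take (ci + 1)
      = monthOrder.rotate (ci + 1) := by
    rw [List.rotate_eq_drop_append_take (by omega)]
  rw [hrot]
  have hrlen : (monthOrder.rotate (ci + 1)).length = 12 := by
    rw [List.length_rotate, hlen]
  apply List.ext_getElem
  · simp [PySem.List.length_enumerate, hrlen]
  · intro p h1 h2
    have hp : p < 12 := by simp_all [PySem.List.length_enumerate]
    rw [List.getElem_map, List.getElem_map, PySem.List.getElem_enumerate]
    have hm12 : (p + (ci + 1)) % 12 < monthOrder.length := by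
      rw [hlen]; exact Nat.mod_lt _ (by norm_num)
    have hget : (monthOrder.rotate (ci + 1))[p]'(by omega) = monthOrder[(p + (ci + 1)) % 12]'hm12 := by
      have := List.getElem_rotate monthOrder (ci + 1) p (by omega)
      simpa [hlen] using this
    rw [List.getElem_range]
    dsimp only
    rw [Prod.mk.injEq]
    refine ⟨?_, ?_⟩
    · rw [hget]
      have hidx : (ci + 1 + p) % 12 = (p + (ci + 1)) % 12 := by omega
      rw [hidx, List.getElem?_eq_getElem hm12, Option.getD_some]
    · have hdiv : (((ci + 1 + p) / 12 : Nat) : Int)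
          = if ((ci + 1 : Nat) : Int) + (0 + (p : Int)) < 12 then 0 else 1 := by
        split_ifs with h <;> omega
      rw [hdiv]

-- tiling n whole-year blocks gives the first 12*n entries of the closed form
lemma gfmTile_eq (ci : Nat) (s : Int) (n : Nat) :
    (List.range n).flatMap (fun (c : Nat) =>
      ((List.range 12).map (fun p =>
        ((monthOrder[(ci + 1 + p) % 12]?).getD "", s + (((ci + 1 + p) / 12 : Nat) : Int)))).map
        (fun my => (my.1, my.2 + (0 + (c : Int)))))
    = gfmSpec ci s (12 * n) := by
  induction n with
  | zero => simp [gfmSpec]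
  | succ n ih =>
    rw [show List.range (n + 1) = List.range n ++ [n] from List.range_succ,
        List.flatMap_append, ih]
    unfold gfmSpec
    have h12 : 12 * (n + 1) = 12 * n + 12 := by ring
    rw [h12, List.range_add, List.map_append]
    congr 1
    simp only [List.flatMap_cons, List.flatMap_nil, List.append_nil, List.map_map]
    refine List.map_congr_left (fun p hp => ?_)
    have hp12 : p < 12 := List.mem_range.mp hp
    simp only [Function.comp_apply]
    rw [Prod.mk.injEq]
    refine ⟨?_, ?_⟩
    · congr 2
      omega
    · have hd : (ci + 1 + (12 * n + p)) / 12 = (ci + 1 + p) / 12 + n := by omega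
      rw [hd]
      push_cast
      ring

-- ===== VERDICT (by name: the statement is the Claim_ definition above) =====
theorem get_future_months_spec : Claim_equal_get_future_months := by
  intro m s ma _ hpre
  unfold Spec_get_future_months get_future_months get_future_months_alt
  have hmem : m ∈ monthOrder := hpre
  obtain ⟨ci, hci⟩ := (PySem.List.index?_isSome_iff (xs := monthOrder) (v := m)).mpr hmem
    |> Option.isSome_iff_exists.mp
  rw [hci]
  obtain ⟨hk, -, -⟩ := PySem.List.getElem_of_index?_eq_some hci
  have hk12 : ci < 12 := by simpa [monthOrder] using hk
  dsimp only
  rw [gfmA_eq ci s ma, gfmBase_eq ci s hk12,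
      PySem.Int.floordiv_eq_ediv_of_pos (a := ma + 11) (by norm_num),
      PySem.List.pyRange_one, PySem.List.foldl_append_eq_flatMap, List.nil_append,
      List.flatMap_map]
  have hz : ((ma + 11) / 12 - 0).toNat = ((ma + 11) / 12).toNat := by omega
  rw [hz, gfmTile_eq ci s ((ma + 11) / 12).toNat]
  by_cases hma : 0 ≤ ma
  · rw [PySem.List.slice_to _ hma]
    unfold gfmSpec
    rw [← List.map_take, List.take_range]
    have hmin : min ma.toNat (12 * ((ma + 11) / 12).toNat) = ma.toNat := by omega
    rw [hmin]
  · have h0 : (12 * ((ma + 11) / 12).toNat) = 0 := by omega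
    have h0' : ma.toNat = 0 := by omega
    rw [h0, h0']
    simp [gfmSpec, PySem.List.slice]
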